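-- pv_equiv track=rewrite | github.com/jcprimo/python-training | hanoi/hanoi_ascii.py | create_ring
-- ===== SOURCE A (Python) =====
-- def create_ring(size, max_size):
-- 	res_ring = []
-- 	# What the fuck are we doing here?
-- 	middle = max_size #4
-- 	first_bracket = max_size - size #2
-- 	last_bracket = max_size + size #6
--
-- 	# When the size is 0 then loop thru the range
-- 	# of 2*max +1m and append to the ring
-- 	if size == 0:
-- 		for i in range(2 * max_size + 1): #PEMDAS
-- 			res_ring.append(" ")
--
-- 	else:
-- 		for i in range(2 * max_size + 1):
-- 			if i == first_bracket:
-- 				res_ring.append("<")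
--
-- 			# If we are in the middle of the disc
-- 			# then write the number to indicate the level
-- 			elif i == middle and size > 1:
-- 				res_ring.append(str(size))
-- 			elif first_bracket < i < last_bracket:
-- 				res_ring.append("-")
-- 			elif i == last_bracket:
-- 				res_ring.append(">")
-- 			else:
-- 				res_ring.append(" ")
-- 	return res_ring
-- ===== SOURCE B (Python) =====
-- def create_ring(size, max_size):
--     n = 2 * max_size + 1
--     res = [" "] * max(0, n)
--     if size != 0:
--         first = max_size - size
--         last = max_size + size
--         lo = max(0, first + 1)
--         hi = min(len(res), last)
--         if lo < hi:
--             res[lo:hi] = ["-"] * (hi - lo)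
--         if size > 1 and 0 <= max_size < len(res):
--             res[max_size] = str(size)
--         if 0 <= first < len(res):
--             res[first] = "<"
--         if 0 <= last < len(res):
--             res[last] = ">"
--     return res
-- ===== Notes on version B (the rewrite author's own statement) =====
-- stated objective: simpler
-- what changed: Replaces the per-index branch cascade over range(2*max_size+1) with a default-plus-patch construction: build the uniform space row once, bulk-assign the dash interior by a clamped slice, then stamp the two brackets and the level digit with bounds-checked single writes.
import Mathlib
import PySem

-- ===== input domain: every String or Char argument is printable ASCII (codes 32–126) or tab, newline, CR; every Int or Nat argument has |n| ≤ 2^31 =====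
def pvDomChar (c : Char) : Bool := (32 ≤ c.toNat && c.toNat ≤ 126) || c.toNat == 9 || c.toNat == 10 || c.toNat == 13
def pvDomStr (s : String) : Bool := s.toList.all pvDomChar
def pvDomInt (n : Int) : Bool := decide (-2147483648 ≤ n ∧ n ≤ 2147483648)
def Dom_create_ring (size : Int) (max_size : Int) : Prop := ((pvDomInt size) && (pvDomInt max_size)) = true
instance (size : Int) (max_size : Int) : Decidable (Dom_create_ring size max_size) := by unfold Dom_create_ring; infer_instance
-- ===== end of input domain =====

-- B builds the row once as a uniform default and stamps the brackets/dashes/digit with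
-- bounds-checked patches, instead of A's per-index branch cascade (objective: simpler).

-- ===== PORT A =====
def create_ring (size : Int) (max_size : Int) : List String :=
  let middle := max_size
  let first_bracket := max_size - size
  let last_bracket := max_size + size
  if size = 0 then
    (PySem.List.pyRange 0 (2 * max_size + 1) 1).foldl (fun res_ring _ => res_ring ++ [" "]) []
  else
    (PySem.List.pyRange 0 (2 * max_size + 1) 1).foldl (fun res_ring i =>
      if i = first_bracket then res_ring ++ ["<"]
      else if i = middle ∧ size > 1 then res_ring ++ [PySem.Int.toStr size]
      else if first_bracket < i ∧ i < last_bracket then res_ring ++ ["-"]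
      else if i = last_bracket then res_ring ++ [">"]
      else res_ring ++ [" "]) []

-- ===== PORT B =====
def create_ring_alt (size : Int) (max_size : Int) : List String :=
  let n := 2 * max_size + 1
  let res0 := List.replicate (max 0 n).toNat " "
  if size = 0 then res0 else
    let first := max_size - size
    let last := max_size + size
    let lo := max 0 (first + 1)
    let hi := min ((res0.length : Int)) last
    -- slice assignment res[lo:hi] = ["-"]*(hi-lo) with 0 ≤ lo ≤ len, hi ≤ len: exact as take/replicate/drop
    let res1 := if lo < hi then res0.take lo.toNat ++ List.replicate (hi - lo).toNat "-" ++ res0.drop hi.toNat else res0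
    let res2 := if size > 1 ∧ 0 ≤ max_size ∧ max_size < (res1.length : Int) then res1.set max_size.toNat (PySem.Int.toStr size) else res1
    let res3 := if 0 ≤ first ∧ first < (res2.length : Int) then res2.set first.toNat "<" else res2
    if 0 ≤ last ∧ last < (res3.length : Int) then res3.set last.toNat ">" else res3

-- ===== PRECONDITION & SPEC =====
def Spec_create_ring (size : Int) (max_size : Int) (out : List String) : Prop := out = create_ring_alt size max_size
instance (size : Int) (max_size : Int) (out : List String) : Decidable (Spec_create_ring size max_size out) := by unfold Spec_create_ring; infer_instance

-- ===== CLAIM (what is proved, stated in full; the proofs are below) =====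
def Claim_equal_create_ring : Prop := ∀ (size : Int) (max_size : Int), Dom_create_ring size max_size → Spec_create_ring size max_size (create_ring size max_size)

-- ===== LEMMAS AND PROOFS =====

/-- The per-cell value of A's branch cascade. -/
def pvCell (size m i : Int) : String :=
  if i = m - size then "<"
  else if i = m ∧ size > 1 then PySem.Int.toStr size
  else if m - size < i ∧ i < m + size then "-"
  else if i = m + size then ">"
  else " "

theorem foldl_snoc {α β : Type} (f : α → β) (l : List α) (acc : List β) :
    l.foldl (fun a i => a ++ [f i]) acc = acc ++ l.map f := by
  induction l generalizing acc with
  | nil => simp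
  | cons x xs ih => simp [List.foldl_cons, ih]

theorem set_map_range {α : Type} (N : ℕ) (f : ℕ → α) (i : ℕ) (a : α) :
    ((List.range N).map f).set i a = (List.range N).map (fun k => if k = i then a else f k) := by
  apply List.ext_getElem
  · simp
  · intro j h1 h2
    simp only [List.getElem_set, List.getElem_map, List.getElem_range]
    split_ifs <;> first | rfl | omega

theorem cond_set_map {α : Type} (N : ℕ) (f : ℕ → α) (c : Prop) [Decidable c] (i : ℕ) (a : α) :
    (if c then ((List.range N).map f).set i a else (List.range N).map f)
      = (List.range N).map (fun k => if c ∧ k = i then a else f k) := by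
  split_ifs with hc
  · rw [set_map_range]
    exact List.map_congr_left (fun k _ => by simp [hc])
  · exact List.map_congr_left (fun k _ => by simp [hc])

theorem dashRow (N : ℕ) (lo hi : Int) (hlo : 0 ≤ lo) (hhi : hi ≤ (N : Int)) :
    (if lo < hi then (List.replicate N (" " : String)).take lo.toNat ++ List.replicate (hi - lo).toNat "-" ++ (List.replicate N (" " : String)).drop hi.toNat else List.replicate N " ")
      = (List.range N).map (fun (k : ℕ) => if lo ≤ (k : Int) ∧ (k : Int) < hi then "-" else " ") := by
  split_ifs with h
  · apply List.ext_getElem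
    · simp; omega
    · intro j h1 h2
      simp only [List.take_replicate, List.drop_replicate, List.length_map, List.length_range] at h1 h2
      simp only [List.take_replicate, List.drop_replicate, List.getElem_append,
        List.getElem_replicate, List.length_replicate, List.length_append, List.getElem_map, List.getElem_range]
      split_ifs <;> first | rfl | omega
  · apply List.ext_getElem
    · simp
    · intro j h1 h2
      simp only [List.length_replicate] at h1
      simp only [List.getElem_map, List.getElem_range, List.getElem_replicate]
      split_ifs with hc
      · omega
      · rfl

theorem create_ring_eq_map (size m : Int) (h : size ≠ 0) :
    create_ring size m = (List.range (2 * m + 1).toNat).map (fun (k : ℕ) => pvCell size m (k : Int)) := by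
  unfold create_ring
  simp only [if_neg h]
  have hf : (fun (res_ring : List String) (i : Int) =>
      if i = m - size then res_ring ++ ["<"]
      else if i = m ∧ size > 1 then res_ring ++ [PySem.Int.toStr size]
      else if m - size < i ∧ i < m + size then res_ring ++ ["-"]
      else if i = m + size then res_ring ++ [">"]
      else res_ring ++ [" "]) = fun res_ring i => res_ring ++ [pvCell size m i] := by
    funext res i
    simp only [pvCell]
    split_ifs <;> rfl
  rw [hf, foldl_snoc, PySem.List.pyRange_one]
  simp [List.map_map, Function.comp_def]

theorem create_ring_alt_eq_map (size m : Int) (h : size ≠ 0) :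
    create_ring_alt size m = (List.range (2 * m + 1).toNat).map (fun (k : ℕ) =>
      if (0 ≤ m + size ∧ m + size < (((2 * m + 1).toNat : Int))) ∧ k = (m + size).toNat then ">"
      else if (0 ≤ m - size ∧ m - size < (((2 * m + 1).toNat : Int))) ∧ k = (m - size).toNat then "<"
      else if (size > 1 ∧ 0 ≤ m ∧ m < (((2 * m + 1).toNat : Int))) ∧ k = m.toNat then PySem.Int.toStr size
      else if max 0 (m - size + 1) ≤ (k : Int) ∧ (k : Int) < min (((2 * m + 1).toNat : Int)) (m + size) then "-"
      else " ") := by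
  unfold create_ring_alt
  simp only [if_neg h]
  have hN : (max 0 (2 * m + 1)).toNat = (2 * m + 1).toNat := by omega
  rw [hN]
  rw [dashRow ((2 * m + 1).toNat) (max 0 (m - size + 1))
      (min (((List.replicate (2 * m + 1).toNat (" " : String)).length : Int)) (m + size))
      (by omega) (by simp only [List.length_replicate]; omega)]
  simp only [List.length_replicate, apply_ite List.length, List.length_set,
    List.length_map, List.length_range, ite_self]
  rw [cond_set_map, cond_set_map, cond_set_map]

theorem create_ring_spec' (size m : Int) : create_ring size m = create_ring_alt size m := by
  by_cases h : size = 0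
  · subst h
    unfold create_ring create_ring_alt
    simp only [reduceIte]
    rw [show (fun (res_ring : List String) (_ : Int) => res_ring ++ [" "])
          = fun (res_ring : List String) i => res_ring ++ [(fun (_ : Int) => " ") i] from rfl,
        foldl_snoc]
    simp only [List.nil_append, List.map_const', PySem.List.length_pyRange_one]
    congr 1
    omega
  · rw [create_ring_eq_map size m h, create_ring_alt_eq_map size m h]
    apply List.map_congr_left
    intro k hk
    simp only [List.mem_range] at hk
    simp only [pvCell]
    split_ifs <;> first | rfl | omega

-- ===== VERDICT (by name: the statement is the Claim_ definition above) =====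
theorem create_ring_spec : Claim_equal_create_ring := by
  intro size max_size _
  exact create_ring_spec' size max_size
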